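-- pv_equiv track=rewrite | github.com/muhffikkri/asa | pertemuan3/ronde_apel.py | apple_weight
-- ===== SOURCE A (Python) =====
-- def fpb(a, b):
--     if b == 0:
--         return a
--     else:
--         return fpb(b, a % b)
--
-- def apple_weight(n, a, b):
--     mod = 1000000007
--
--     val = fpb(a, b)
--
--     r = b // val
--     h = a // val
--     k = n // r
--
--     apple_distribution = (k * (r + h)) % mod
--
--     if val == a:
--         return apple_distribution
--     else:
--         a_new, b_new = val, a
--         return (apple_distribution + apple_weight(n, a_new, b_new)) % mod
-- ===== SOURCE B (Python) =====
-- def apple_weight(n, a, b):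
--     # Non-recursive: iterative Euclid for the gcd, then the sum in closed two-term form.
--     mod = 1000000007
--     g, t = a, b
--     while t != 0:
--         g, t = t, g % t
--     total = (n // (b // g)) * ((b // g) + (a // g)) % mod
--     if g != a:
--         total = (total + (n // (a // g)) * ((a // g) + 1) % mod) % mod
--     return total
-- ===== Notes on version B (the rewrite author's own statement) =====
-- stated objective: simpler
-- what changed: Replaces both recursions (recursive Euclid gcd and the recursive state-chain mod-sum) with an iterative gcd loop followed by a closed two-term formula, exploiting that after one step the state (gcd(a,b), a) is a fixed point.
import Mathlib
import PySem

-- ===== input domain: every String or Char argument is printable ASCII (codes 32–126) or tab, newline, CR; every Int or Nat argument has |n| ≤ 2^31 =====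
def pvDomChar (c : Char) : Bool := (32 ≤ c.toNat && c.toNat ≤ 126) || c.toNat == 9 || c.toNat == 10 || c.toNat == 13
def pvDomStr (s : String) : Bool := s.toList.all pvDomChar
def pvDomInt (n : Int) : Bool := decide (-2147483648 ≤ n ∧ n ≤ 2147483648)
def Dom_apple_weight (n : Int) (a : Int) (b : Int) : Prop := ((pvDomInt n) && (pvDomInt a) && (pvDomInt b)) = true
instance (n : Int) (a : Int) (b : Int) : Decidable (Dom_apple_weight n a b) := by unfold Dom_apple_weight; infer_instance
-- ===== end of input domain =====

-- B replaces both recursions (recursive Euclid gcd, recursive mod-sum over (a,b) states) by an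
-- iterative gcd loop plus a closed two-term formula; return-value equivalence on same-sign nonzero a, b.

-- ===== PORT A =====
-- termination helper for the Python-% Euclid recursion
theorem pvModAbsLt (a b : Int) (hb : b ≠ 0) : (PySem.Int.mod a b).natAbs < b.natAbs := by
  rcases lt_or_gt_of_ne hb with h | h
  · have := PySem.Int.mod_neg_bounds a h
    omega
  · have h1 := PySem.Int.mod_nonneg a h
    have h2 := PySem.Int.mod_lt a h
    omega

def fpb (a b : Int) : Int :=
  if b = 0 then a else fpb b (PySem.Int.mod a b)
termination_by b.natAbs
decreasing_by exact pvModAbsLt a b (by assumption)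

-- A's apple_weight recursion diverges (Python RecursionError) on mixed-sign inputs, so the port
-- is fuel-bounded; inside Pre_ the recursion depth is at most 2, far under the fuel.
def appleF : Nat → Int → Int → Int → Int
  | 0, _, _, _ => 0  -- fuel exhaustion (unreachable inside Pre_)
  | fuel+1, n, a, b =>
    let md : Int := 1000000007
    let val := fpb a b
    let r := PySem.Int.floordiv b val
    let h := PySem.Int.floordiv a val
    let k := PySem.Int.floordiv n r
    let apple_distribution := PySem.Int.mod (k * (r + h)) md
    if val = a then apple_distribution
    else PySem.Int.mod (apple_distribution + appleF fuel n val a) md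

def apple_weight (n : Int) (a : Int) (b : Int) : Int := appleF 1000 n a b

-- ===== PORT B =====
def gcdLoop (g t : Int) : Int :=
  if t ≠ 0 then gcdLoop t (PySem.Int.mod g t) else g
termination_by t.natAbs
decreasing_by exact pvModAbsLt g t (by assumption)

def apple_weight_alt (n : Int) (a : Int) (b : Int) : Int :=
  let md : Int := 1000000007
  let g := gcdLoop a b
  let total := PySem.Int.mod
    (PySem.Int.floordiv n (PySem.Int.floordiv b g) *
      (PySem.Int.floordiv b g + PySem.Int.floordiv a g)) md
  if g ≠ a then
    PySem.Int.mod (total +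
      PySem.Int.mod (PySem.Int.floordiv n (PySem.Int.floordiv a g) *
        (PySem.Int.floordiv a g + 1)) md) md
  else total

-- ===== PRECONDITION & SPEC =====
-- Pre_ admits exactly the inputs on which A returns: a and b nonzero with the same sign.
-- (a = 0 or b = 0 hits ZeroDivisionError; mixed signs make A's recursion oscillate until RecursionError.)
def Pre_apple_weight (n : Int) (a : Int) (b : Int) : Prop :=
  (0 < a ∧ 0 < b) ∨ (a < 0 ∧ b < 0)
instance (n : Int) (a : Int) (b : Int) : Decidable (Pre_apple_weight n a b) := by
  unfold Pre_apple_weight; infer_instance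
def pvWitness_apple_weight : Int × Int × Int := (10, 4, 6)

def Spec_apple_weight (n : Int) (a : Int) (b : Int) (out : Int) : Prop := out = apple_weight_alt n a b
instance (n : Int) (a : Int) (b : Int) (out : Int) : Decidable (Spec_apple_weight n a b out) := by unfold Spec_apple_weight; infer_instance

-- ===== CLAIM (what is proved, stated in full; the proofs are below) =====
def Claim_equal_apple_weight : Prop := ∀ (n : Int) (a : Int) (b : Int), Dom_apple_weight n a b → Pre_apple_weight n a b → Spec_apple_weight n a b (apple_weight n a b)

-- ===== LEMMAS AND PROOFS =====

-- fpb and gcdLoop are the same recursion (branches flipped)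
theorem fpb_eq_gcdLoop (a b : Int) : fpb a b = gcdLoop a b := by
  by_cases hb : b = 0
  · rw [fpb, gcdLoop]; simp [hb]
  · rw [fpb, gcdLoop]; simp only [hb, if_false, ne_eq, not_false_iff, if_true]
    exact fpb_eq_gcdLoop b (PySem.Int.mod a b)
termination_by b.natAbs
decreasing_by exact pvModAbsLt a b hb

-- invariant of the Euclid recursion on the positive cone
theorem fpb_props_pos (b a : Int) (ha : 0 < a) (hb : 0 ≤ b) :
    0 < fpb a b ∧ fpb a b ∣ a ∧ fpb a b ∣ b := by
  by_cases h0 : b = 0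
  · rw [fpb]; simp [h0, ha]
  · have hbpos : 0 < b := lt_of_le_of_ne hb (Ne.symm h0)
    have hm1 := PySem.Int.mod_nonneg a hbpos
    have ih := fpb_props_pos (PySem.Int.mod a b) b hbpos hm1
    rw [fpb]; simp only [h0, if_false]
    refine ⟨ih.1, ?_, ih.2.1⟩
    have hdm := PySem.Int.floordiv_mul_add_mod a b
    have hda := dvd_add (Dvd.dvd.mul_left ih.2.1 (PySem.Int.floordiv a b)) ih.2.2
    rwa [hdm] at hda
termination_by b.natAbs
decreasing_by exact pvModAbsLt a b h0

-- invariant of the Euclid recursion on the negative cone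
theorem fpb_props_neg (b a : Int) (ha : a < 0) (hb : b ≤ 0) :
    fpb a b < 0 ∧ fpb a b ∣ a ∧ fpb a b ∣ b := by
  by_cases h0 : b = 0
  · rw [fpb]; simp [h0, ha]
  · have hbneg : b < 0 := lt_of_le_of_ne hb h0
    have hm := PySem.Int.mod_neg_bounds a hbneg
    have ih := fpb_props_neg (PySem.Int.mod a b) b hbneg hm.2
    rw [fpb]; simp only [h0, if_false]
    refine ⟨ih.1, ?_, ih.2.1⟩
    have hdm := PySem.Int.floordiv_mul_add_mod a b
    have hda := dvd_add (Dvd.dvd.mul_left ih.2.1 (PySem.Int.floordiv a b)) ih.2.2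
    rwa [hdm] at hda
termination_by b.natAbs
decreasing_by exact pvModAbsLt a b h0

-- Python g % a = g when g, a share a sign and |g| < |a|
theorem mod_small_pos (g a : Int) (h1 : 0 ≤ g) (h2 : g < a) : PySem.Int.mod g a = g := by
  have ha : 0 < a := lt_of_le_of_lt h1 h2
  rw [PySem.Int.mod_eq_emod_of_pos ha]
  exact Int.emod_eq_of_lt h1 h2

theorem mod_small_neg (g a : Int) (h1 : g ≤ 0) (h2 : a < g) : PySem.Int.mod g a = g := by
  have ha : a < 0 := lt_of_lt_of_le h2 h1
  have hmb := PySem.Int.mod_neg_bounds g ha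
  have hdm := PySem.Int.floordiv_mul_add_mod g a
  -- both mod g a and g lie in (a, 0] and differ by a multiple of a, so the quotient is 0
  set q := PySem.Int.floordiv g a with hq
  set m := PySem.Int.mod g a with hm
  have h1' : a < q * a := by omega
  have h2' : q * a < -a := by omega
  have habs : (q * a).natAbs < a.natAbs := by omega
  rw [Int.natAbs_mul] at habs
  have hq0 : q.natAbs = 0 := by
    by_contra hne
    have h1n : 1 ≤ q.natAbs := Nat.one_le_iff_ne_zero.mpr hne
    have := Nat.le_mul_of_pos_left a.natAbs (by omega : 0 < q.natAbs)
    omega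
  have hz : q = 0 := Int.natAbs_eq_zero.mp hq0
  have hza : q * a = 0 := by rw [hz]; ring
  omega

-- divisibility kills the mod
theorem mod_of_dvd (a g : Int) (h : g ∣ a) : PySem.Int.mod a g = 0 :=
  (PySem.Int.mod_eq_zero_iff_dvd a g).mpr h

-- second-level gcd: fpb g a = g when g properly divides a with matching sign
theorem fpb_fix (g a : Int) (hd : g ∣ a) (hne : g ≠ a)
    (hsgn : (0 < g ∧ 0 < a) ∨ (g < 0 ∧ a < 0)) : fpb g a = g := by
  have ha0 : a ≠ 0 := by rcases hsgn with ⟨_, h⟩ | ⟨_, h⟩ <;> omega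
  have hmga : PySem.Int.mod g a = g := by
    rcases hsgn with ⟨hg, ha⟩ | ⟨hg, ha⟩
    · -- 0 < g ≤ a, g ≠ a
      have hle : g ≤ a := Int.le_of_dvd ha hd
      exact mod_small_pos g a (le_of_lt hg) (lt_of_le_of_ne hle hne)
    · -- a ≤ g < 0
      have hle : a ≤ g := by
        have := Int.le_of_dvd (by omega : (0:Int) < -a) (Int.neg_dvd.mpr (Int.dvd_neg.mpr hd))
        omega
      exact mod_small_neg g a (le_of_lt hg) (lt_of_le_of_ne hle (Ne.symm hne))
  have hg0 : g ≠ 0 := by rcases hsgn with ⟨h, _⟩ | ⟨h, _⟩ <;> omega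
  rw [fpb]; simp only [ha0, if_false, hmga]
  rw [fpb]; simp only [hg0, if_false, mod_of_dvd a g hd]
  rw [fpb]; simp

theorem apple_weight_eq (n a b : Int) (h : Pre_apple_weight n a b) :
    apple_weight n a b = apple_weight_alt n a b := by
  have hkey : ((0 < fpb a b ∧ 0 < a) ∨ (fpb a b < 0 ∧ a < 0)) ∧ fpb a b ∣ a := by
    rcases h with ⟨ha, hb⟩ | ⟨ha, hb⟩
    · have := fpb_props_pos b a ha (le_of_lt hb)
      exact ⟨Or.inl ⟨this.1, ha⟩, this.2.1⟩
    · have := fpb_props_neg b a ha (le_of_lt hb)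
      exact ⟨Or.inr ⟨this.1, ha⟩, this.2.1⟩
  set g := fpb a b with hg
  by_cases hval : g = a
  · -- one level on both sides
    unfold apple_weight appleF apple_weight_alt
    rw [← fpb_eq_gcdLoop, ← hg]
    simp [hval]
  · -- two levels: A's recursive call returns its first term since fpb g a = g
    have hsgn : (0 < g ∧ 0 < a) ∨ (g < 0 ∧ a < 0) := hkey.1
    have hdvd_a : g ∣ a := hkey.2
    have hg0 : g ≠ 0 := by rcases hsgn with ⟨h1,_⟩|⟨h1,_⟩ <;> omega
    have hfix : fpb g a = g := fpb_fix g a hdvd_a hval hsgn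
    have hgg : PySem.Int.floordiv g g = 1 := by
      rcases hsgn with ⟨h1, _⟩ | ⟨h1, _⟩
      · rw [PySem.Int.floordiv_eq_ediv_of_pos h1, Int.ediv_self hg0]
      · have hfd := PySem.Int.floordiv_neg_neg (-g) (-g)
        simp only [neg_neg] at hfd
        rw [hfd, PySem.Int.floordiv_eq_ediv_of_pos (by omega : (0:Int) < -g),
            Int.ediv_self (by omega : (-g : Int) ≠ 0)]
    unfold apple_weight appleF apple_weight_alt
    rw [← fpb_eq_gcdLoop, ← hg]
    simp only [hval, if_false, ne_eq, not_false_iff, if_true]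
    unfold appleF
    simp only [hfix, hgg, if_true]

-- ===== VERDICT (by name: the statement is the Claim_ definition above) =====
theorem apple_weight_spec : Claim_equal_apple_weight := by
  intro n a b _ hpre
  unfold Spec_apple_weight
  exact apple_weight_eq n a b hpre
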